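-- pv_equiv track=rewrite | github.com/sailself/TelegramGroupHelperBot | bot/tools/twitter_extractor.py | _collect_relevant_lines
-- ===== SOURCE A (Python) =====
-- from typing import Any, Dict, List, Optional, Tuple
--
-- _STOP_MARKERS = {
--     "new to x?",
--     "join x today",
--     "sign up now to get your own personalized timeline!",
--     "sign up",
--     "log in",
--     "tweet your reply",
--     "trending now",
--     "what's happening",
--     "terms of service",
--     "privacy policy",
--     "cookie policy",
--     "accessibility",
--     "ads info",
-- }
--
-- _STOP_PREFIXES = (
--     "watch on",
--     "show more",
--     "related",
--     "more replies",
--     "explore",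
--     "tweet your reply",
-- )
--
-- def _collect_relevant_lines(markdown_block: str) -> List[str]:
--     lines = markdown_block.splitlines()
--     relevant: List[str] = []
--     collecting = False
--     seen_content = False
--
--     for line in lines:
--         stripped = line.strip()
--         lowered = stripped.lower()
--
--         if not collecting:
--             if lowered == "conversation":
--                 collecting = True
--             continue
--
--         if not seen_content:
--             if not stripped or set(stripped) <= {"-", "—", "–"}:
--                 continue
--             seen_content = True
--
--         if not stripped:
--             if relevant and relevant[-1] != "":
--                 relevant.append("")
--             continue
--
--         if lowered in _STOP_MARKERS or any(lowered.startswith(prefix) for prefix in _STOP_PREFIXES):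
--             break
--
--         relevant.append(line)
--
--     if not relevant:
--         for line in lines:
--             stripped = line.strip()
--             if not stripped:
--                 continue
--             lowered = stripped.lower()
--             if lowered in _STOP_MARKERS or any(lowered.startswith(prefix) for prefix in _STOP_PREFIXES):
--                 break
--             relevant.append(line)
--     return relevant
-- ===== SOURCE B (Python) =====
-- from typing import List
--
-- _STOP_MARKERS = {
--     "new to x?",
--     "join x today",
--     "sign up now to get your own personalized timeline!",
--     "sign up",
--     "log in",
--     "tweet your reply",
--     "trending now",
--     "what's happening",
--     "terms of service",
--     "privacy policy",
--     "cookie policy",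
--     "accessibility",
--     "ads info",
-- }
--
-- _STOP_PREFIXES = (
--     "watch on",
--     "show more",
--     "related",
--     "more replies",
--     "explore",
--     "tweet your reply",
-- )
--
--
-- def _is_stop(lowered: str) -> bool:
--     return lowered in _STOP_MARKERS or lowered.startswith(_STOP_PREFIXES)
--
--
-- def _stop_index(lines: List[str]) -> int:
--     """Index of the first stop line, or len(lines) if none."""
--     return next((i for i, l in enumerate(lines) if _is_stop(l.strip().lower())), len(lines))
--
--
-- def _collect_relevant_lines(markdown_block: str) -> List[str]:
--     lines = markdown_block.splitlines()
--     relevant: List[str] = []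
--     header = next((i for i, l in enumerate(lines) if l.strip().lower() == "conversation"), None)
--     if header is not None:
--         body = lines[header + 1:]
--         start = next((i for i, l in enumerate(body) if not set(l.strip()) <= set("-\u2014\u2013")), len(body))
--         after = body[start:]
--         kept = after[:_stop_index(after)]
--         relevant = [l if l.strip() else ""
--                     for i, l in enumerate(kept)
--                     if l.strip() or kept[i - 1].strip()]
--     if not relevant:
--         nonblank = [l for l in lines if l.strip()]
--         relevant = nonblank[:_stop_index(nonblank)]
--     return relevant
-- ===== Notes on version B (the rewrite author's own statement) =====
-- stated objective: alternative
-- what changed: Replaces A's two-flag state machine with break/continue by index arithmetic and slicing: the header, the first content line and the first stop line are located with next(enumerate(...)) index searches, the region is cut out with slices, and blank collapsing is a single comprehension that keeps a blank only when its predecessor is non-blank; the fallback is a filter plus a slice instead of a skip/break loop.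
import Mathlib
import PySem

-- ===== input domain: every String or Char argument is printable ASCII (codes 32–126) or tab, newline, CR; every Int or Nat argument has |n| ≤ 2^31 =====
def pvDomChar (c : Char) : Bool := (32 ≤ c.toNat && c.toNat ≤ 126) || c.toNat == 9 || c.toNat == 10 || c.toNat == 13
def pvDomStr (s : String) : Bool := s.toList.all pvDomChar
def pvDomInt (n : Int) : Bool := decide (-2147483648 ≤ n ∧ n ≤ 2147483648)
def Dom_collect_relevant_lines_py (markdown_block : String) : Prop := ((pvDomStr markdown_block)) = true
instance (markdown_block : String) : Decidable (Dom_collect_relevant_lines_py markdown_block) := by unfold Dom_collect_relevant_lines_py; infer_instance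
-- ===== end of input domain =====

-- B replaces A's two-flag state machine (break/continue loop) by index searches, slicing and
-- a predecessor-aware comprehension — objective: alternative decomposition, same cost.

-- shared module constants
def pvStopMarkers : List String :=
  ["new to x?", "join x today", "sign up now to get your own personalized timeline!",
   "sign up", "log in", "tweet your reply", "trending now", "what's happening",
   "terms of service", "privacy policy", "cookie policy", "accessibility", "ads info"]

def pvStopPrefixes : List String :=
  ["watch on", "show more", "related", "more replies", "explore", "tweet your reply"]

def pvDash (c : Char) : Bool := c == '-' || c == '—' || c == '–'

-- ===== PORT A =====
-- A's single for-loop with flags `collecting` and `seen_content`; relevant is the accumulator.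
def pvALoop : List String → List String → Bool → Bool → List String
  | [], relevant, _, _ => relevant
  | line :: rest, relevant, collecting, seen =>
    let stripped := PySem.Str.strip line
    let lowered := PySem.Str.lower stripped
    if !collecting then
      if lowered = "conversation" then pvALoop rest relevant true seen
      else pvALoop rest relevant false seen
    else if !seen && (decide (stripped = "") || stripped.toList.all pvDash) then
      pvALoop rest relevant collecting seen
    else if stripped = "" then
      if relevant ≠ [] ∧ relevant.getLast? ≠ some "" then pvALoop rest (relevant ++ [""]) collecting true
      else pvALoop rest relevant collecting true
    else if pvStopMarkers.contains lowered || pvStopPrefixes.any (fun p => PySem.Str.startswith lowered p) then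
      relevant
    else pvALoop rest (relevant ++ [line]) collecting true

-- A's fallback for-loop (runs when the first loop collected nothing)
def pvAFallback : List String → List String → List String
  | [], relevant => relevant
  | line :: rest, relevant =>
    let stripped := PySem.Str.strip line
    if stripped = "" then pvAFallback rest relevant
    else if pvStopMarkers.contains (PySem.Str.lower stripped) || pvStopPrefixes.any (fun p => PySem.Str.startswith (PySem.Str.lower stripped) p) then
      relevant
    else pvAFallback rest (relevant ++ [line])

def collect_relevant_lines_py (markdown_block : String) : List String :=
  let lines := PySem.Str.splitlines markdown_block
  let relevant := pvALoop lines [] false false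
  if relevant = [] then pvAFallback lines [] else relevant

-- ===== PORT B =====
def pvIsStop (lowered : String) : Bool :=
  pvStopMarkers.contains lowered || pvStopPrefixes.any (fun p => PySem.Str.startswith lowered p)

-- _stop_index: index of the first stop line, or len(lines) if none (next(..., len(lines)))
def pvStopIdx (lines : List String) : Nat :=
  lines.findIdx (fun l => pvIsStop (PySem.Str.lower (PySem.Str.strip l)))

-- set(l.strip()) <= set("-—–")
def pvIsSepLine (l : String) : Bool := (PySem.Str.strip l).toList.all pvDash

def collect_relevant_lines_py_alt (markdown_block : String) : List String :=
  let lines := PySem.Str.splitlines markdown_block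
  let relevant : List String :=
    match lines.findIdx? (fun l => PySem.Str.lower (PySem.Str.strip l) == "conversation") with
    | none => []
    | some header =>
      let body := PySem.List.slice lines (some ((header : Int) + 1)) none
      let start := body.findIdx (fun l => !pvIsSepLine l)
      let after := PySem.List.slice body (some ((start : Nat) : Int)) none
      let kept := PySem.List.slice after none (some ((pvStopIdx after : Nat) : Int))
      (PySem.List.enumerate kept 0).filterMap (fun il =>
        if !(PySem.Str.strip il.2 == "") ||
           !(PySem.Str.strip ((PySem.List.pyGet? kept (il.1 - 1)).getD "") == "") then
          some (if !(PySem.Str.strip il.2 == "") then il.2 else "")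
        else none)
  if relevant = [] then
    let nonblank := lines.filter (fun l => !(PySem.Str.strip l == ""))
    PySem.List.slice nonblank none (some ((pvStopIdx nonblank : Nat) : Int))
  else relevant

-- ===== PRECONDITION & SPEC =====
def Spec_collect_relevant_lines_py (markdown_block : String) (out : List String) : Prop := out = collect_relevant_lines_py_alt markdown_block
instance (markdown_block : String) (out : List String) : Decidable (Spec_collect_relevant_lines_py markdown_block out) := by unfold Spec_collect_relevant_lines_py; infer_instance

-- ===== CLAIM (what is proved, stated in full; the proofs are below) =====
def Claim_equal_collect_relevant_lines_py : Prop := ∀ (markdown_block : String), Dom_collect_relevant_lines_py markdown_block → Spec_collect_relevant_lines_py markdown_block (collect_relevant_lines_py markdown_block)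

-- ===== LEMMAS AND PROOFS =====

-- predicates used only in the proofs
def pvBlank (l : String) : Bool := decide (PySem.Str.strip l = "")
def pvStopLine (l : String) : Bool := pvIsStop (PySem.Str.lower (PySem.Str.strip l))

-- common collapsed-output function: pb = "previous kept line is blank (or nothing kept yet)"
def pvCol : Bool → List String → List String
  | _, [] => []
  | pb, l :: t =>
    if pvBlank l then (if pb then pvCol true t else "" :: pvCol true t)
    else l :: pvCol false t

theorem pv_blank_isSep (l : String) (h : pvBlank l = true) : pvIsSepLine l = true := by
  unfold pvBlank at h; unfold pvIsSepLine
  simp only [decide_eq_true_eq] at h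
  simp [h]

theorem pv_blank_not_stop (l : String) (h : pvBlank l = true) : pvStopLine l = false := by
  unfold pvBlank at h
  simp only [decide_eq_true_eq] at h
  unfold pvStopLine
  rw [h]
  decide

theorem pv_nonblank_of_ne (l : String) (h : PySem.Str.strip l ≠ "") : l ≠ "" := by
  intro he; exact h (by subst he; decide)

-- A's pre-collection phase = the findIdx? search for the 'conversation' line
theorem pvALoop_pre (lines rel : List String) :
    pvALoop lines rel false false =
      (match lines.findIdx? (fun l => PySem.Str.lower (PySem.Str.strip l) == "conversation") with
       | none => rel
       | some h => pvALoop (lines.drop (h + 1)) rel true false) := by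
  induction lines with
  | nil => simp [pvALoop]
  | cons line rest ih =>
    by_cases h : PySem.Str.lower (PySem.Str.strip line) = "conversation"
    · simp only [pvALoop, Bool.not_false, if_true, if_pos h]
      rw [List.findIdx?_cons]
      have hc : (PySem.Str.lower (PySem.Str.strip line) == "conversation") = true := by simp [h]
      rw [hc]
      rfl
    · simp only [pvALoop, Bool.not_false, if_true, if_neg h, ih]
      rw [List.findIdx?_cons]
      have hc : (PySem.Str.lower (PySem.Str.strip line) == "conversation") = false := by
        simp [h]
      rw [hc]
      cases hf : rest.findIdx? (fun l => PySem.Str.lower (PySem.Str.strip l) == "conversation") <;> simp [hf]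

-- A's collection loop (seen_content = True) = pvCol with the flag read off the accumulator
theorem pvALoop_seen (lines : List String) : ∀ rel,
    pvALoop lines rel true true =
      rel ++ pvCol (decide (rel = []) || decide (rel.getLast? = some ""))
        (lines.takeWhile (fun l => !pvStopLine l)) := by
  induction lines with
  | nil => intro rel; simp [pvALoop, pvCol]
  | cons line rest ih =>
    intro rel
    simp only [pvALoop, Bool.not_true, Bool.false_and, Bool.false_eq_true, if_false]
    by_cases hb : PySem.Str.strip line = ""
    · have hbb : pvBlank line = true := by simp [pvBlank, hb]
      have htw : (line :: rest).takeWhile (fun l => !pvStopLine l)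
          = line :: rest.takeWhile (fun l => !pvStopLine l) := by
        simp [List.takeWhile_cons, pv_blank_not_stop line hbb]
      rw [if_pos hb, htw]
      by_cases hc : rel ≠ [] ∧ rel.getLast? ≠ some ""
      · have hflag : (decide (rel = []) || decide (rel.getLast? = some "")) = false := by
          simp [hc.1, hc.2]
        rw [if_pos hc, ih, hflag]
        have hflag2 : (decide (rel ++ [""] = []) || decide ((rel ++ [""]).getLast? = some "")) = true := by
          simp [List.getLast?_concat]
        rw [hflag2]
        simp [pvCol, hbb]
      · have hflag : (decide (rel = []) || decide (rel.getLast? = some "")) = true := by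
          by_cases h1 : rel = []
          · simp [h1]
          · have h2 : rel.getLast? = some "" := by
              by_contra h2; exact hc ⟨h1, h2⟩
            simp [h2]
        rw [if_neg hc, ih, hflag]
        simp [pvCol, hbb]
    · have hbb : pvBlank line = false := by simp [pvBlank, hb]
      rw [if_neg hb]
      by_cases hs : pvStopLine line = true
      · have hsx : (pvStopMarkers.contains (PySem.Str.lower (PySem.Str.strip line)) ||
            pvStopPrefixes.any (fun p => PySem.Str.startswith (PySem.Str.lower (PySem.Str.strip line)) p)) = true := hs
        rw [if_pos hsx]
        have htw : (line :: rest).takeWhile (fun l => !pvStopLine l) = [] := by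
          simp [List.takeWhile_cons, hs]
        rw [htw]
        simp [pvCol]
      · have hs' : (pvStopMarkers.contains (PySem.Str.lower (PySem.Str.strip line)) ||
            pvStopPrefixes.any (fun p => PySem.Str.startswith (PySem.Str.lower (PySem.Str.strip line)) p)) = true → False := hs
        rw [if_neg hs']
        have htw : (line :: rest).takeWhile (fun l => !pvStopLine l)
            = line :: rest.takeWhile (fun l => !pvStopLine l) := by
          simp only [Bool.not_eq_true] at hs
          simp [List.takeWhile_cons, hs]
        rw [htw, ih]
        have hflag2 : (decide (rel ++ [line] = []) || decide ((rel ++ [line]).getLast? = some "")) = false := by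
          simp [List.getLast?_concat, pv_nonblank_of_ne line hb]
        rw [hflag2]
        simp [pvCol, hbb]

-- A's skip phase (seen_content = False) = dropWhile separators, then the collection
theorem pvALoop_skip (lines : List String) : ∀ rel,
    pvALoop lines rel true false =
      rel ++ pvCol true ((lines.dropWhile pvIsSepLine).takeWhile (fun l => !pvStopLine l)) := by
  induction lines with
  | nil => intro rel; simp [pvALoop, pvCol]
  | cons line rest ih =>
    intro rel
    simp only [pvALoop, Bool.not_true, Bool.not_false, Bool.true_and, Bool.false_eq_true, if_false]
    have hsepeq : (decide (PySem.Str.strip line = "") || (PySem.Str.strip line).toList.all pvDash)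
        = pvIsSepLine line := by
      by_cases hb : PySem.Str.strip line = "" <;> simp [pvIsSepLine, hb]
    rw [hsepeq]
    by_cases hsep : pvIsSepLine line = true
    · rw [if_pos hsep, List.dropWhile_cons_of_pos hsep, ih]
    · rw [if_neg (by simp [hsep]), List.dropWhile_cons_of_neg (by simp [hsep])]
      have hb : ¬ PySem.Str.strip line = "" := by
        intro h; exact hsep (pv_blank_isSep line (by simp [pvBlank, h]))
      rw [if_neg hb]
      by_cases hs : pvStopLine line = true
      · have hsx : (pvStopMarkers.contains (PySem.Str.lower (PySem.Str.strip line)) ||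
            pvStopPrefixes.any (fun p => PySem.Str.startswith (PySem.Str.lower (PySem.Str.strip line)) p)) = true := hs
        rw [if_pos hsx]
        have htw : (line :: rest).takeWhile (fun l => !pvStopLine l) = [] := by
          simp [List.takeWhile_cons, hs]
        rw [htw]
        simp [pvCol]
      · have hs' : (pvStopMarkers.contains (PySem.Str.lower (PySem.Str.strip line)) ||
            pvStopPrefixes.any (fun p => PySem.Str.startswith (PySem.Str.lower (PySem.Str.strip line)) p)) = true → False := hs
        rw [if_neg hs']
        have htw : (line :: rest).takeWhile (fun l => !pvStopLine l)
            = line :: rest.takeWhile (fun l => !pvStopLine l) := by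
          simp only [Bool.not_eq_true] at hs
          simp [List.takeWhile_cons, hs]
        rw [htw, pvALoop_seen]
        have hflag2 : (decide (rel ++ [line] = []) || decide ((rel ++ [line]).getLast? = some "")) = false := by
          simp [List.getLast?_concat, pv_nonblank_of_ne line hb]
        rw [hflag2]
        have hbb : pvBlank line = false := by simp [pvBlank, hb]
        simp [pvCol, hbb]

-- A's fallback loop = filter non-blank, then takeWhile non-stop
theorem pvAFallback_eq (lines : List String) : ∀ rel,
    pvAFallback lines rel =
      rel ++ (lines.filter (fun l => !(PySem.Str.strip l == ""))).takeWhile (fun l => !pvStopLine l) := by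
  induction lines with
  | nil => intro rel; simp [pvAFallback]
  | cons line rest ih =>
    intro rel
    simp only [pvAFallback]
    by_cases hb : PySem.Str.strip line = ""
    · rw [if_pos hb, ih]
      have : (!(PySem.Str.strip line == "")) = false := by simp [hb]
      simp [List.filter_cons, this]
    · rw [if_neg hb]
      have hkeep : (!(PySem.Str.strip line == "")) = true := by simp [hb]
      have hfl : (line :: rest).filter (fun l => !(PySem.Str.strip l == ""))
          = line :: rest.filter (fun l => !(PySem.Str.strip l == "")) := by
        simp [List.filter_cons, hb]
      rw [hfl]
      by_cases hs : pvStopLine line = true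
      · have hsx : (pvStopMarkers.contains (PySem.Str.lower (PySem.Str.strip line)) ||
            pvStopPrefixes.any (fun p => PySem.Str.startswith (PySem.Str.lower (PySem.Str.strip line)) p)) = true := hs
        rw [if_pos hsx]
        have htw : ((line :: rest.filter (fun l => !(PySem.Str.strip l == ""))).takeWhile
            (fun l => !pvStopLine l)) = [] := by
          simp [List.takeWhile_cons, hs]
        rw [htw, List.append_nil]
      · have hs' : (pvStopMarkers.contains (PySem.Str.lower (PySem.Str.strip line)) ||
            pvStopPrefixes.any (fun p => PySem.Str.startswith (PySem.Str.lower (PySem.Str.strip line)) p)) = true → False := hs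
        rw [if_neg hs', ih]
        have htw : ((line :: rest.filter (fun l => !(PySem.Str.strip l == ""))).takeWhile
            (fun l => !pvStopLine l))
            = line :: (rest.filter (fun l => !(PySem.Str.strip l == ""))).takeWhile (fun l => !pvStopLine l) := by
          simp only [Bool.not_eq_true] at hs
          simp [List.takeWhile_cons, hs]
        rw [htw]
        simp

-- findIdx bridges: B's index searches = dropWhile / takeWhile
theorem pv_drop_findIdx (xs : List String) :
    xs.drop (xs.findIdx (fun l => !pvIsSepLine l)) = xs.dropWhile pvIsSepLine := by
  induction xs with
  | nil => simp
  | cons x t ih =>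
    by_cases h : pvIsSepLine x = true
    · rw [List.dropWhile_cons_of_pos h, List.findIdx_cons]
      simp [h, ih]
    · rw [List.dropWhile_cons_of_neg h, List.findIdx_cons]
      simp [h]

theorem pv_take_stopIdx (xs : List String) :
    xs.take (pvStopIdx xs) = xs.takeWhile (fun l => !pvStopLine l) := by
  induction xs with
  | nil => simp
  | cons x t ih =>
    unfold pvStopIdx at ih ⊢
    rw [List.findIdx_cons]
    by_cases h : pvIsStop (PySem.Str.lower (PySem.Str.strip x)) = true
    · have hsl : pvStopLine x = true := h
      simp [h, List.takeWhile_cons, hsl]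
    · have hsl : pvStopLine x = false := by simpa [pvStopLine] using h
      simp [h, List.takeWhile_cons, hsl, ih]

-- the predecessor-aware comprehension over the suffix kept.drop n = pvCol with prev blankness
theorem pv_comp_aux (kept : List String) : ∀ (t : List String) (n : Nat), 0 < n → kept.drop n = t →
    (PySem.List.enumerate t (n : Int)).filterMap (fun il =>
        if !(PySem.Str.strip il.2 == "") ||
           !(PySem.Str.strip ((PySem.List.pyGet? kept (il.1 - 1)).getD "") == "") then
          some (if !(PySem.Str.strip il.2 == "") then il.2 else "")
        else none)
      = pvCol (pvBlank (kept.getD (n - 1) "")) t := by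
  intro t
  induction t with
  | nil => intro n _ _; simp [PySem.List.enumerate_nil, pvCol]
  | cons l t' ih =>
    intro n hn hdrop
    have hlen : n < kept.length := by
      by_contra hge
      rw [List.drop_eq_nil_of_le (by omega)] at hdrop
      exact (List.cons_ne_nil l t') hdrop.symm
    have hget : kept.getD n "" = l := by
      have := List.drop_eq_getElem_cons hlen
      rw [hdrop] at this
      have hx : kept[n] = l := (List.cons.injEq _ _ _ _ ▸ this.symm).1
      simp [List.getD_eq_getElem?_getD, List.getElem?_eq_getElem hlen, hx]
    have hdrop' : kept.drop (n + 1) = t' := by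
      rw [← List.tail_drop, hdrop]; rfl
    have hprev : PySem.List.pyGet? kept ((n : Int) - 1) = some (kept.getD (n - 1) "") := by
      have h1 : ((n : Int) - 1) = ((n - 1 : Nat) : Int) := by omega
      rw [h1, PySem.List.pyGet?_natCast]
      have hlt : n - 1 < kept.length := by omega
      simp [List.getD_eq_getElem?_getD, List.getElem?_eq_getElem hlt]
    rw [PySem.List.enumerate_cons, List.filterMap_cons]
    have hstart : ((n : Int) + 1) = ((n + 1 : Nat) : Int) := by omega
    rw [hstart, ih (n + 1) (by omega) hdrop']
    have hprevsimp : kept.getD (n + 1 - 1) "" = l := by simpa using hget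
    rw [hprevsimp]
    by_cases hb : PySem.Str.strip l = ""
    · have hb' : (!(PySem.Str.strip l == "")) = false := by simp [hb]
      by_cases hpb : PySem.Str.strip (kept.getD (n - 1) "") = ""
      · have hpbq : PySem.Str.strip (kept[n - 1]?.getD "") = "" := by
          rw [← List.getD_eq_getElem?_getD]; exact hpb
        have hcond : (!(PySem.Str.strip l == "") ||
            !(PySem.Str.strip ((PySem.List.pyGet? kept ((n : Int) - 1)).getD "") == "")) = false := by
          rw [hprev]; simp [hb, hpb, hpbq]
        simp only [hcond, Bool.false_eq_true, if_false]
        simp [pvCol, pvBlank, hb, hpb, hpbq, List.getD_eq_getElem?_getD]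
      · have hpbq : ¬ PySem.Str.strip (kept[n - 1]?.getD "") = "" := by
          rw [← List.getD_eq_getElem?_getD]; exact hpb
        have hcond : (!(PySem.Str.strip l == "") ||
            !(PySem.Str.strip ((PySem.List.pyGet? kept ((n : Int) - 1)).getD "") == "")) = true := by
          rw [hprev]; simp [hpb, hpbq]
        simp only [hcond, if_true, hb']
        rw [hprev]
        simp [pvCol, pvBlank, hb, hpb, hpbq, List.getD_eq_getElem?_getD]
    · have hb' : (!(PySem.Str.strip l == "")) = true := by simp [hb]
      simp only [hb', Bool.true_or, if_true]
      simp [pvCol, pvBlank, hb]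

-- head lemmas: the first kept line is non-blank
theorem pv_head_takeWhile (xs : List String) (p : String → Bool) (h : String)
    (hh : (xs.takeWhile p).head? = some h) : xs.head? = some h := by
  induction xs with
  | nil => simp at hh
  | cons x t _ =>
    rw [List.takeWhile_cons] at hh
    by_cases hp : p x = true
    · rw [if_pos hp] at hh; simpa using hh
    · rw [if_neg hp] at hh; simp at hh

theorem pv_head_dropWhile (xs : List String) (p : String → Bool) (h : String)
    (hh : (xs.dropWhile p).head? = some h) : p h = false := by
  induction xs with
  | nil => simp at hh
  | cons x t ih =>
    by_cases hp : p x = true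
    · rw [List.dropWhile_cons_of_pos hp] at hh; exact ih hh
    · rw [List.dropWhile_cons_of_neg hp] at hh
      simp only [List.head?_cons, Option.some.injEq] at hh
      rw [← hh]
      simpa using hp

-- the comprehension over all of kept, when kept's head is non-blank
theorem pv_comp (kept : List String)
    (hhd : ∀ h, kept.head? = some h → pvBlank h = false) :
    (PySem.List.enumerate kept 0).filterMap (fun il =>
        if !(PySem.Str.strip il.2 == "") ||
           !(PySem.Str.strip ((PySem.List.pyGet? kept (il.1 - 1)).getD "") == "") then
          some (if !(PySem.Str.strip il.2 == "") then il.2 else "")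
        else none)
      = pvCol false kept := by
  cases kept with
  | nil => simp [PySem.List.enumerate_nil, pvCol]
  | cons x t =>
    have hbx : pvBlank x = false := hhd x rfl
    have hbx' : ¬ PySem.Str.strip x = "" := by
      unfold pvBlank at hbx; simpa using hbx
    rw [PySem.List.enumerate_cons, List.filterMap_cons]
    have hcond : (!(PySem.Str.strip x == "")) = true := by simp [hbx']
    simp only [hcond, Bool.true_or, if_true]
    have h01 : ((0 : Int) + 1) = ((1 : Nat) : Int) := by omega
    rw [h01, pv_comp_aux (x :: t) t 1 (by omega) rfl]
    have hg : (x :: t).getD (1 - 1) "" = x := rfl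
    rw [hg]
    simp [pvCol, hbx]

theorem pvCol_flag (xs : List String)
    (hhd : ∀ h, xs.head? = some h → pvBlank h = false) :
    pvCol true xs = pvCol false xs := by
  cases xs with
  | nil => rfl
  | cons x t =>
    have hbx : pvBlank x = false := hhd x rfl
    simp [pvCol, hbx]

-- ===== VERDICT (by name: the statement is the Claim_ definition above) =====
theorem collect_relevant_lines_py_spec : Claim_equal_collect_relevant_lines_py := by
  intro mb _
  show collect_relevant_lines_py mb = collect_relevant_lines_py_alt mb
  unfold collect_relevant_lines_py collect_relevant_lines_py_alt
  simp only []
  generalize PySem.Str.splitlines mb = lines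
  rw [pvALoop_pre]
  cases hf : lines.findIdx? (fun l => PySem.Str.lower (PySem.Str.strip l) == "conversation") with
  | none =>
    simp only []
    rw [pvAFallback_eq, PySem.List.slice_to_natCast, pv_take_stopIdx]
    simp
  | some h =>
    simp only []
    have hbody : PySem.List.slice lines (some ((h : Int) + 1)) none = lines.drop (h + 1) := by
      have : ((h : Int) + 1) = ((h + 1 : Nat) : Int) := by omega
      rw [this, PySem.List.slice_from_natCast]
    rw [hbody]
    set body := lines.drop (h + 1) with hbodydef
    have hafter : PySem.List.slice body (some ((body.findIdx (fun l => !pvIsSepLine l) : Nat) : Int)) none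
        = body.dropWhile pvIsSepLine := by
      rw [PySem.List.slice_from_natCast, pv_drop_findIdx]
    rw [hafter]
    set after := body.dropWhile pvIsSepLine with hafterdef
    have hkept : PySem.List.slice after none (some ((pvStopIdx after : Nat) : Int))
        = after.takeWhile (fun l => !pvStopLine l) := by
      rw [PySem.List.slice_to_natCast, pv_take_stopIdx]
    rw [hkept]
    set kept := after.takeWhile (fun l => !pvStopLine l) with hkeptdef
    have hhd : ∀ hd, kept.head? = some hd → pvBlank hd = false := by
      intro hd hh
      have h1 : after.head? = some hd := pv_head_takeWhile _ _ _ hh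
      have h2 : pvIsSepLine hd = false := pv_head_dropWhile body pvIsSepLine hd h1
      by_contra hb
      simp only [Bool.not_eq_false] at hb
      rw [pv_blank_isSep hd hb] at h2
      exact absurd h2 (by decide)
    rw [pv_comp kept hhd, pvALoop_skip, ← pvCol_flag kept hhd]
    simp only [List.nil_append]
    by_cases hrel : pvCol true kept = []
    · rw [hrel]
      simp only [if_pos rfl]
      rw [pvAFallback_eq, PySem.List.slice_to_natCast, pv_take_stopIdx]
      simp
    · rw [if_neg hrel, if_neg hrel]
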